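-- pv_equiv track=rewrite | github.com/maciejjankowski/evil1.org | scripts/consolidate_backlog.py | resolve_merge_conflicts
-- ===== SOURCE A (Python) =====
-- def resolve_merge_conflicts(content):
--     """
--     Remove Git merge conflict markers and combine both sides of conflicts.
--     """
--     lines = content.split('\n')
--     resolved_lines = []
--     i = 0
--
--     while i < len(lines):
--         line = lines[i]
--
--         # Check for start of merge conflict
--         if line.startswith('<<<<<<< '):
--             # Find the end of the conflict
--             conflict_start = i
--             head_content = []
--             other_content = []
--
--             # Skip the HEAD marker
--             i += 1
--
--             # Collect HEAD content until =======
--             while i < len(lines) and not lines[i].startswith('======='):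
--                 head_content.append(lines[i])
--                 i += 1
--
--             # Skip the ======= marker
--             if i < len(lines) and lines[i].startswith('======='):
--                 i += 1
--
--             # Collect other branch content until >>>>>>>
--             while i < len(lines) and not lines[i].startswith('>>>>>>> '):
--                 other_content.append(lines[i])
--                 i += 1
--
--             # Skip the closing marker
--             if i < len(lines) and lines[i].startswith('>>>>>>> '):
--                 i += 1
--
--             # Combine both sides with a separator
--             resolved_lines.extend(head_content)
--             if other_content:  # Only add separator if there's other content
--                 resolved_lines.append('')  # Empty line for separation
--                 resolved_lines.extend(other_content)
--
--         else:
--             resolved_lines.append(line)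
--             i += 1
--
--     return '\n'.join(resolved_lines)
-- ===== SOURCE B (Python) =====
-- NORMAL, IN_HEAD, IN_OTHER = 0, 1, 2
--
-- def resolve_merge_conflicts(content):
--     """
--     Remove Git merge conflict markers and combine both sides of conflicts.
--     Single flat state-machine pass over the lines.
--     """
--     resolved_lines = []
--     head_content = []
--     other_content = []
--     state = NORMAL
--
--     def flush():
--         resolved_lines.extend(head_content)
--         if other_content:
--             resolved_lines.append('')
--             resolved_lines.extend(other_content)
--
--     for line in content.split('\n'):
--         if state == NORMAL:
--             if line.startswith('<<<<<<< '):
--                 state = IN_HEAD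
--                 head_content = []
--                 other_content = []
--             else:
--                 resolved_lines.append(line)
--         elif state == IN_HEAD:
--             if line.startswith('======='):
--                 state = IN_OTHER
--             else:
--                 head_content.append(line)
--         else:  # IN_OTHER
--             if line.startswith('>>>>>>> '):
--                 flush()
--                 state = NORMAL
--             else:
--                 other_content.append(line)
--
--     if state != NORMAL:
--         flush()
--
--     return '\n'.join(resolved_lines)
-- ===== Notes on version B (the rewrite author's own statement) =====
-- stated objective: simpler
-- what changed: Replaced A's index-driven outer while with two nested marker-collecting inner whiles by a single flat state-machine pass (NORMAL/IN_HEAD/IN_OTHER) over the lines with head/other buffers and one flush.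
import Mathlib
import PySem

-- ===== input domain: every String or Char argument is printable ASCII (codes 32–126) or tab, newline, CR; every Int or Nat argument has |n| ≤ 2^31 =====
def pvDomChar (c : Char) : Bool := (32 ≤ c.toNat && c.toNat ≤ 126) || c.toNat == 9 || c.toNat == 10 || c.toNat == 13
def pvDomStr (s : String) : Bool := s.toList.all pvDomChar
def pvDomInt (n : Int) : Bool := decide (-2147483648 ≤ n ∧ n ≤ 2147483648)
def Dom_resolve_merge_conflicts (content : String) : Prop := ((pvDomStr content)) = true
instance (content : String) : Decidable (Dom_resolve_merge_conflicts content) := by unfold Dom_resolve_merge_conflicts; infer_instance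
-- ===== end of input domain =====

-- B replaces A's index-based outer while with two nested collector whiles by a single
-- flat state-machine pass (NORMAL/IN_HEAD/IN_OTHER) over the lines; objective: simpler.

-- ===== PORT A =====
-- inner 'while i < len(lines) and not lines[i].startswith(p)' collecting lines
def pvCollect (p : String) (xs : List String) : List String × List String :=
  match xs with
  | [] => ([], [])
  | l :: rest =>
    if PySem.Str.startswith l p then ([], l :: rest)
    else
      let r := pvCollect p rest
      (l :: r.1, r.2)

-- 'if i < len(lines) and lines[i].startswith(p): i += 1'
def pvSkip (p : String) (xs : List String) : List String :=
  match xs with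
  | [] => []
  | m :: r => if PySem.Str.startswith m p then r else m :: r

theorem pvCollect_snd_length (p : String) (xs : List String) :
    (pvCollect p xs).2.length ≤ xs.length := by
  induction xs with
  | nil => simp [pvCollect]
  | cons l rest ih =>
    simp only [pvCollect]
    split <;> simp <;> omega

theorem pvSkip_length (p : String) (xs : List String) :
    (pvSkip p xs).length ≤ xs.length := by
  cases xs with
  | nil => simp [pvSkip]
  | cons m r => simp only [pvSkip]; split <;> simp

-- A's outer 'while i < len(lines)' loop, as recursion on the remaining lines
def pvResolveAux (lines : List String) : List String :=
  match lines with
  | [] => []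
  | l :: rest =>
    if PySem.Str.startswith l "<<<<<<< " then
      let head := (pvCollect "=======" rest).1
      let r2 := pvSkip "=======" (pvCollect "=======" rest).2
      let other := (pvCollect ">>>>>>> " r2).1
      let r4 := pvSkip ">>>>>>> " (pvCollect ">>>>>>> " r2).2
      (head ++ (if other = [] then [] else "" :: other)) ++ pvResolveAux r4
    else l :: pvResolveAux rest
termination_by lines.length
decreasing_by
  · have h1 := pvCollect_snd_length "=======" rest
    have h2 := pvSkip_length "=======" (pvCollect "=======" rest).2
    have h3 := pvCollect_snd_length ">>>>>>> " (pvSkip "=======" (pvCollect "=======" rest).2)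
    have h4 := pvSkip_length ">>>>>>> "
      (pvCollect ">>>>>>> " (pvSkip "=======" (pvCollect "=======" rest).2)).2
    simp only [List.length_cons]; omega
  · simp

def resolve_merge_conflicts (content : String) : String :=
  PySem.Str.join "\n" (pvResolveAux (((PySem.Str.split? content "\n").getD [])))

-- ===== PORT B =====
-- flush(): resolved.extend(head); if other: append '' and extend other
def pvFlush (res head other : List String) : List String :=
  res ++ head ++ (if other = [] then [] else "" :: other)

-- one step of B's for-loop; state 0 = NORMAL, 1 = IN_HEAD, 2 = IN_OTHER;
-- accumulator = (state, head_content, other_content, resolved_lines)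
def pvStepB (acc : Nat × List String × List String × List String) (line : String) :
    Nat × List String × List String × List String :=
  let st := acc.1
  let head := acc.2.1
  let other := acc.2.2.1
  let res := acc.2.2.2
  if st = 0 then
    if PySem.Str.startswith line "<<<<<<< " then (1, [], [], res)
    else (0, head, other, res ++ [line])
  else if st = 1 then
    if PySem.Str.startswith line "=======" then (2, head, other, res)
    else (1, head ++ [line], other, res)
  else
    if PySem.Str.startswith line ">>>>>>> " then (0, head, other, pvFlush res head other)
    else (2, head, other ++ [line], res)

def resolve_merge_conflicts_alt (content : String) : String :=
  let fin := (((PySem.Str.split? content "\n").getD [])).foldl pvStepB (0, [], [], [])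
  PySem.Str.join "\n" (if fin.1 ≠ 0 then pvFlush fin.2.2.2 fin.2.1 fin.2.2.1 else fin.2.2.2)

-- ===== PRECONDITION & SPEC =====
def Spec_resolve_merge_conflicts (content : String) (out : String) : Prop := out = resolve_merge_conflicts_alt content
instance (content : String) (out : String) : Decidable (Spec_resolve_merge_conflicts content out) := by unfold Spec_resolve_merge_conflicts; infer_instance

-- ===== CLAIM (what is proved, stated in full; the proofs are below) =====
def Claim_equal_resolve_merge_conflicts : Prop := ∀ (content : String), Dom_resolve_merge_conflicts content → Spec_resolve_merge_conflicts content (resolve_merge_conflicts content)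

-- ===== LEMMAS AND PROOFS =====

def pvFinalize (a : Nat × List String × List String × List String) : List String :=
  if a.1 ≠ 0 then pvFlush a.2.2.2 a.2.1 a.2.2.1 else a.2.2.2

theorem pvCollect_head_startswith (p : String) (xs : List String) (m : String) (r : List String)
    (h : (pvCollect p xs).2 = m :: r) : PySem.Str.startswith m p = true := by
  induction xs with
  | nil => simp [pvCollect] at h
  | cons l rest ih =>
    simp only [pvCollect] at h
    split at h
    · next hs => cases h; simpa using hs
    · exact ih h

theorem pvHeadPhase (xs : List String) (head other res : List String) :
    xs.foldl pvStepB (1, head, other, res) =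
      (match (pvCollect "=======" xs).2 with
       | [] => (1, head ++ (pvCollect "=======" xs).1, other, res)
       | _ :: r => r.foldl pvStepB (2, head ++ (pvCollect "=======" xs).1, other, res)) := by
  induction xs generalizing head with
  | nil => simp [pvCollect]
  | cons l rest ih =>
    by_cases hs : PySem.Str.startswith l "=======" = true
    · simp at hs
      simp [pvCollect, pvStepB, hs]
    · simp at hs
      rw [List.foldl_cons]
      have hstep : pvStepB (1, head, other, res) l = (1, head ++ [l], other, res) := by
        simp [pvStepB, hs]
      rw [hstep, ih]
      cases hc : (pvCollect "=======" rest).2 <;> simp [pvCollect, hs, hc]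

theorem pvOtherPhase (xs : List String) (head other res : List String) :
    xs.foldl pvStepB (2, head, other, res) =
      (match (pvCollect ">>>>>>> " xs).2 with
       | [] => (2, head, other ++ (pvCollect ">>>>>>> " xs).1, res)
       | _ :: r => r.foldl pvStepB
           (0, head, other ++ (pvCollect ">>>>>>> " xs).1,
            pvFlush res head (other ++ (pvCollect ">>>>>>> " xs).1))) := by
  induction xs generalizing other with
  | nil => simp [pvCollect]
  | cons l rest ih =>
    by_cases hs : PySem.Str.startswith l ">>>>>>> " = true
    · simp at hs
      simp [pvCollect, pvStepB, hs]
    · simp at hs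
      rw [List.foldl_cons]
      have hstep : pvStepB (2, head, other, res) l = (2, head, other ++ [l], res) := by
        simp [pvStepB, hs]
      rw [hstep, ih]
      cases hc : (pvCollect ">>>>>>> " rest).2 <;> simp [pvCollect, hs, hc]

theorem pvMainLoop (n : Nat) : ∀ (xs : List String), xs.length ≤ n →
    ∀ (head other res : List String),
      pvFinalize (xs.foldl pvStepB (0, head, other, res)) = res ++ pvResolveAux xs := by
  induction n with
  | zero =>
    intro xs hxs head other res
    have : xs = [] := List.length_eq_zero_iff.mp (Nat.le_zero.mp hxs)
    subst this
    simp [pvFinalize, pvResolveAux]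
  | succ n ih =>
    intro xs hxs head other res
    cases xs with
    | nil => simp [pvFinalize, pvResolveAux]
    | cons l rest =>
      rw [pvResolveAux]
      by_cases hs : PySem.Str.startswith l "<<<<<<< " = true
      · rw [if_pos hs]
        dsimp only
        simp at hs
        have hstep : pvStepB (0, head, other, res) l = (1, [], [], res) := by
          simp [pvStepB, hs]
        rw [List.foldl_cons, hstep, pvHeadPhase]
        cases hc1 : (pvCollect "=======" rest).2 with
        | nil =>
          simp [pvFinalize, pvFlush, pvSkip, pvCollect, pvResolveAux]
        | cons m r =>
          have hm : PySem.Str.startswith m "=======" = true :=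
            pvCollect_head_startswith _ _ _ _ hc1
          have hskip : pvSkip "=======" (m :: r) = r := by
            simp only [pvSkip, hm]; simp
          rw [hskip]
          dsimp only
          rw [pvOtherPhase]
          have hlen1 := pvCollect_snd_length "=======" rest
          cases hc2 : (pvCollect ">>>>>>> " r).2 with
          | nil =>
            simp [pvFinalize, pvFlush, pvSkip, pvResolveAux]
          | cons m' r' =>
            have hm' : PySem.Str.startswith m' ">>>>>>> " = true :=
              pvCollect_head_startswith _ _ _ _ hc2
            have hskip2 : pvSkip ">>>>>>> " (m' :: r') = r' := by
              simp only [pvSkip, hm']; simp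
            rw [hskip2]
            dsimp only
            have hlen2 := pvCollect_snd_length ">>>>>>> " r
            have hr' : r'.length ≤ n := by
              rw [hc1] at hlen1; rw [hc2] at hlen2
              simp only [List.length_cons] at hlen1 hlen2 hxs
              omega
            rw [ih r' hr']
            simp [pvFlush, List.append_assoc]
      · rw [if_neg hs]
        have hstep : pvStepB (0, head, other, res) l = (0, head, other, res ++ [l]) := by
          simp at hs
          simp [pvStepB, hs]
        rw [List.foldl_cons, hstep]
        have hrest : rest.length ≤ n := by
          simp only [List.length_cons] at hxs; omega
        rw [ih rest hrest]
        simp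

theorem pvAltEq (content : String) :
    resolve_merge_conflicts_alt content =
      PySem.Str.join "\n"
        (pvFinalize (((PySem.Str.split? content "\n").getD []).foldl pvStepB (0, [], [], []))) := by
  simp only [resolve_merge_conflicts_alt, pvFinalize]

-- ===== VERDICT (by name: the statement is the Claim_ definition above) =====
theorem resolve_merge_conflicts_spec : Claim_equal_resolve_merge_conflicts := by
  intro content _
  unfold Spec_resolve_merge_conflicts
  rw [pvAltEq, pvMainLoop ((PySem.Str.split? content "\n").getD []).length _ le_rfl]
  simp [resolve_merge_conflicts]
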